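-- pv_equiv track=rewrite | github.com/zhoudayang/semeval_2010_task8 | pretreat1/common_pretreat.py | get_entity_pos
-- ===== SOURCE A (Python) =====
-- def get_entity_pos(words):
--     e1_begin = -1
--     e1_end = -1
--     e2_begin = -1
--     e2_end = -1
--     length = len(words)
--     for i in range(length):
--         if words[i] == "e1" and e1_begin == -1:
--             e1_begin = i
--         elif words[i] == "e1" and e1_end == -1:
--             e1_end = i
--         elif words[i] == "e1":
--             assert e1_begin != -1 and e1_end != -1
--         if words[i] == "e2" and e2_begin == -1:
--             e2_begin = i
--         elif words[i] == "e2" and e2_end == -1: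
--             e2_end = i
--         elif words[i] == "e2":
--             assert e2_begin != -1 and e2_end != -1
--     return e1_begin, e1_end, e2_begin, e2_end
-- ===== SOURCE B (Python) =====
-- def _first_two(tag, words):
--     pos = [i for i, w in enumerate(words) if w == tag]
--     begin = pos[0] if pos else -1
--     end = pos[1] if len(pos) > 1 else -1
--     return begin, end
--
--
-- def get_entity_pos(words):
--     e1_begin, e1_end = _first_two("e1", words)
--     e2_begin, e2_end = _first_two("e2", words)
--     return e1_begin, e1_end, e2_begin, e2_end
-- ===== Notes on version B (the rewrite author's own statement) =====
-- stated objective: simpler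
-- what changed: Replaces the single stateful index loop with four -1-sentinel registers and elif chains by a per-tag helper that gathers the tag's positions in one comprehension and selects the first two (default -1), called once for e1 and once for e2.
import Mathlib
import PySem

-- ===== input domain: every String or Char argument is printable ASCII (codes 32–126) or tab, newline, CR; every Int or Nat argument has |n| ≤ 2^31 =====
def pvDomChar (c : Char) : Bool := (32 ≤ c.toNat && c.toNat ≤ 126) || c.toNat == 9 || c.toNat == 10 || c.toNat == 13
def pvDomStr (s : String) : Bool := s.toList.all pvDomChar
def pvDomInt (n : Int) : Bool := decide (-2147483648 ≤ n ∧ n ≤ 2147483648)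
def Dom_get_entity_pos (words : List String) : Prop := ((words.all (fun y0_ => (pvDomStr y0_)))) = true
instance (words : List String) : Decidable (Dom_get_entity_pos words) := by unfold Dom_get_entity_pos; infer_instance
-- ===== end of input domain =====

-- B replaces A's single index loop over four -1-sentinel registers by a per-tag
-- "collect positions, take the first two" helper called twice (simpler decomposition).

-- ===== PORT A =====
def get_entity_pos (words : List String) : Int × Int × Int × Int :=
  let length : Int := words.length
  (PySem.List.pyRange 0 length 1).foldl
    (fun st i =>
      let w := PySem.List.pyGetD words i ""
      let (e1b, e1e, e2b, e2e) := st
      let (e1b, e1e) :=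
        if w == "e1" && e1b == -1 then (i, e1e)
        else if w == "e1" && e1e == -1 then (e1b, i)
        else (e1b, e1e)
      let (e2b, e2e) :=
        if w == "e2" && e2b == -1 then (i, e2e)
        else if w == "e2" && e2e == -1 then (e2b, i)
        else (e2b, e2e)
      (e1b, e1e, e2b, e2e))
    (-1, -1, -1, -1)

-- ===== PORT B =====
def firstTwoPos (tag : String) (words : List String) : Int × Int :=
  let pos := ((PySem.List.enumerate words 0).filter (fun p => p.2 == tag)).map (fun p => p.1)
  match pos with
  | [] => (-1, -1)
  | [a] => (a, -1)
  | a :: b :: _ => (a, b)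

def get_entity_pos_alt (words : List String) : Int × Int × Int × Int :=
  let (e1b, e1e) := firstTwoPos "e1" words
  let (e2b, e2e) := firstTwoPos "e2" words
  (e1b, e1e, e2b, e2e)

-- ===== PRECONDITION & SPEC =====
def Spec_get_entity_pos (words : List String) (out : Int × Int × Int × Int) : Prop := out = get_entity_pos_alt words
instance (words : List String) (out : Int × Int × Int × Int) : Decidable (Spec_get_entity_pos words out) := by unfold Spec_get_entity_pos; infer_instance

-- ===== CLAIM (what is proved, stated in full; the proofs are below) =====
def Claim_equal_get_entity_pos : Prop := ∀ (words : List String), Dom_get_entity_pos words → Spec_get_entity_pos words (get_entity_pos words)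

-- ===== LEMMAS AND PROOFS =====

-- A's loop body, on an (index, word) pair
def pvStep (st : Int × Int × Int × Int) (p : Int × String) : Int × Int × Int × Int :=
  let (e1b, e1e, e2b, e2e) := st
  let (e1b, e1e) :=
    if p.2 == "e1" && e1b == -1 then (p.1, e1e)
    else if p.2 == "e1" && e1e == -1 then (e1b, p.1)
    else (e1b, e1e)
  let (e2b, e2e) :=
    if p.2 == "e2" && e2b == -1 then (p.1, e2e)
    else if p.2 == "e2" && e2e == -1 then (e2b, p.1)
    else (e2b, e2e)
  (e1b, e1e, e2b, e2e)

-- how a (begin, end) register pair absorbs the remaining list of positions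
def pvUpd (st : Int × Int) (ps : List Int) : Int × Int :=
  if st.1 = -1 ∧ st.2 = -1 then
    match ps with
    | [] => (-1, -1)
    | [a] => (a, -1)
    | a :: b :: _ => (a, b)
  else if st.1 = -1 then
    match ps with
    | [] => (-1, st.2)
    | a :: _ => (a, st.2)
  else if st.2 = -1 then
    match ps with
    | [] => (st.1, -1)
    | a :: _ => (st.1, a)
  else st

def pvJoin (p q : Int × Int) : Int × Int × Int × Int := (p.1, p.2, q.1, q.2)

def pvPos (tag : String) (words : List String) (s : Int) : List Int :=
  ((PySem.List.enumerate words s).filter (fun p => p.2 == tag)).map (fun p => p.1)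

theorem pvPos_cons (tag w : String) (l : List String) (s : Int) :
    pvPos tag (w :: l) s = (if w == tag then [s] else []) ++ pvPos tag l (s + 1) := by
  simp [pvPos, PySem.List.enumerate_cons]
  split_ifs with h <;> simp [h]

theorem pv_loop_eq (l : List String) (s : Int) (hs : 0 ≤ s)
    (b1 e1 b2 e2 : Int) :
    (PySem.List.enumerate l s).foldl pvStep (b1, e1, b2, e2) =
      pvJoin (pvUpd (b1, e1) (pvPos "e1" l s)) (pvUpd (b2, e2) (pvPos "e2" l s)) := by
  induction l generalizing s b1 e1 b2 e2 with
  | nil =>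
    simp only [PySem.List.enumerate_nil, List.foldl_nil, pvPos, pvJoin, pvUpd,
      List.filter_nil, List.map_nil]
    split_ifs <;> simp_all
  | cons w l ih =>
    rw [PySem.List.enumerate_cons, List.foldl_cons, pvPos_cons, pvPos_cons]
    have hs' : (0:Int) ≤ s + 1 := by omega
    have hsne : s ≠ -1 := by omega
    by_cases hw1 : w = "e1"
    · have hw2 : w ≠ "e2" := by subst hw1; decide
      subst hw1
      by_cases hb : b1 = -1
      · subst hb
        rw [show pvStep (-1, e1, b2, e2) ((s : Int), "e1") = (s, e1, b2, e2) by
            simp [pvStep]]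
        rw [ih (s+1) hs' s e1 b2 e2]
        by_cases he : e1 = -1
        · subst he
          simp [pvJoin, pvUpd, hsne]
          cases pvPos "e1" l (s+1) <;> simp
        · simp [pvJoin, pvUpd, hsne, he]
      · by_cases he : e1 = -1
        · subst he
          rw [show pvStep (b1, -1, b2, e2) ((s : Int), "e1") = (b1, s, b2, e2) by
              simp [pvStep, hb]]
          rw [ih (s+1) hs' b1 s b2 e2]
          simp [pvJoin, pvUpd, hb, hsne]
        · rw [show pvStep (b1, e1, b2, e2) ((s : Int), "e1") = (b1, e1, b2, e2) by
              simp [pvStep, hb, he]]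
          rw [ih (s+1) hs' b1 e1 b2 e2]
          simp [pvJoin, pvUpd, hb, he]
    · by_cases hw2 : w = "e2"
      · subst hw2
        by_cases hb : b2 = -1
        · subst hb
          rw [show pvStep (b1, e1, -1, e2) ((s : Int), "e2") = (b1, e1, s, e2) by
              simp [pvStep]]
          rw [ih (s+1) hs' b1 e1 s e2]
          by_cases he : e2 = -1
          · subst he
            simp [pvJoin, pvUpd, hsne]
            cases pvPos "e2" l (s+1) <;> simp
          · simp [pvJoin, pvUpd, hsne, he]
        · by_cases he : e2 = -1
          · subst he
            rw [show pvStep (b1, e1, b2, -1) ((s : Int), "e2") = (b1, e1, b2, s) by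
                simp [pvStep, hb]]
            rw [ih (s+1) hs' b1 e1 b2 s]
            simp [pvJoin, pvUpd, hb, hsne]
          · rw [show pvStep (b1, e1, b2, e2) ((s : Int), "e2") = (b1, e1, b2, e2) by
                simp [pvStep, hb, he]]
            rw [ih (s+1) hs' b1 e1 b2 e2]
            simp [pvJoin, pvUpd, hb, he]
      · rw [show pvStep (b1, e1, b2, e2) ((s : Int), w) = (b1, e1, b2, e2) by
            simp [pvStep, hw1, hw2]]
        rw [ih (s+1) hs' b1 e1 b2 e2]
        simp [pvJoin, hw1, hw2]

theorem pvA_eq_enum (words : List String) :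
    get_entity_pos words = (PySem.List.enumerate words 0).foldl pvStep (-1, -1, -1, -1) := by
  unfold get_entity_pos
  rw [PySem.List.enumerate_eq_map_pyRange words "", List.foldl_map]
  rfl

theorem pv_firstTwo_eq (tag : String) (words : List String) :
    firstTwoPos tag words = pvUpd (-1, -1) (pvPos tag words 0) := by
  unfold firstTwoPos pvUpd pvPos
  simp only []
  cases h : ((PySem.List.enumerate words 0).filter (fun p => p.2 == tag)).map (fun p => p.1) with
  | nil => simp
  | cons a t => cases t <;> simp

-- ===== VERDICT (by name: the statement is the Claim_ definition above) =====
theorem get_entity_pos_spec : Claim_equal_get_entity_pos := by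
  intro words _
  unfold Spec_get_entity_pos get_entity_pos_alt
  rw [pvA_eq_enum, pv_loop_eq words 0 (by decide), pv_firstTwo_eq, pv_firstTwo_eq]
  rfl
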